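-- pv_equiv track=rewrite | github.com/LLagoon3/Programmers | Python3/Level_3/코딩테스트 연습 연습문제 선입 선출 스케줄링.py | solution
-- ===== SOURCE A (Python) =====
-- def solution(n, cores):
--     start, end = 0, 40000
--     if n > len(cores): n -= len(cores)
--     else: return n
--     while 1:
--         mid, tmp, coretmp = (start + end) // 2, 0, 0
--         for core in cores:
--             tmp += (mid - 1) // core
--         for i, core in enumerate(cores):
--             if mid % core == 0:
--                 tmp += 1
--                 coretmp = i + 1
--             if tmp == n and coretmp != 0:
--                 return coretmp
--         if tmp >= n: end = mid
--         else: start = mid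
-- ===== SOURCE B (Python) =====
-- def solution(n, cores):
--     if n <= len(cores):
--         return n
--     done = len(cores)
--     t = 0
--     while True:
--         t += 1
--         for i, c in enumerate(cores):
--             if t % c == 0:
--                 done += 1
--                 if done == n:
--                     return i + 1
-- ===== Notes on version B (the rewrite author's own statement) =====
-- stated objective: simpler
-- what changed: Replaces the capped binary search over completion times (with its two counting passes per probe) by a direct forward simulation that hands out jobs in time order and returns the core that receives the n-th job.
-- outside the precondition, e.g. on solution(15, [2, 1, -2, -3]): A returns 2, B returns 1
import Mathlib
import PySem

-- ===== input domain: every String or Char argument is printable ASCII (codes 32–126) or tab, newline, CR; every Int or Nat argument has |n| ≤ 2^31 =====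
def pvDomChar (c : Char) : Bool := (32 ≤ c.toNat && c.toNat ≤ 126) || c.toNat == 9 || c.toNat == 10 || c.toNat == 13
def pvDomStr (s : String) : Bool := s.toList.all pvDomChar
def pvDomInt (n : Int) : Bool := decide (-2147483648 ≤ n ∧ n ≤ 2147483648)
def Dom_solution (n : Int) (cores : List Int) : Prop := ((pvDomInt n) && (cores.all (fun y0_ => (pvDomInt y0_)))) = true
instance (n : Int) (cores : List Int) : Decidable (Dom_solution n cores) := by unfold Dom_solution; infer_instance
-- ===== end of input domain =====

-- B replaces A's capped binary search over completion times by a direct forward simulation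
-- that hands out jobs in time order (objective: simpler).


-- ===== PORT A =====
-- A's inner 'for i, core in enumerate(cores)' loop with its early return:
-- .inl r = 'return r' fired, .inr tmp = the loop fell through with final tmp
def solutionScanA (mid n : Int) : List Int → Int → Int → Int → Sum Int Int
  | [], _i, tmp, _coretmp => Sum.inr tmp
  | core :: rest, i, tmp, coretmp =>
      let tmp' := if PySem.Int.mod mid core = 0 then tmp + 1 else tmp
      let coretmp' := if PySem.Int.mod mid core = 0 then i + 1 else coretmp
      if tmp' = n ∧ coretmp' ≠ 0 then Sum.inl coretmp'
      else solutionScanA mid n rest (i + 1) tmp' coretmp'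

-- A's 'while 1:' binary search; fuel only makes the recursion total (under Pre_ it returns long before)
def solutionLoopA (n : Int) (cores : List Int) : Nat → Int → Int → Int
  | 0, _, _ => 0
  | fuel + 1, start, stop =>
      let mid := PySem.Int.floordiv (start + stop) 2
      let tmp := cores.foldl (fun t core => t + PySem.Int.floordiv (mid - 1) core) 0
      match solutionScanA mid n cores 0 tmp 0 with
      | Sum.inl r => r
      | Sum.inr tmp' =>
          if tmp' ≥ n then solutionLoopA n cores fuel start mid
          else solutionLoopA n cores fuel mid stop

def solution (n : Int) (cores : List Int) : Int :=
  if n > (cores.length : Int) then solutionLoopA (n - (cores.length : Int)) cores 40000 0 40000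
  else n

-- ===== PORT B =====
-- B's inner 'for i, c in enumerate(cores)' of the simulation: .inl r = 'return i+1', .inr d = new done
def solutionScanB (t n : Int) : List Int → Int → Int → Sum Int Int
  | [], _i, done => Sum.inr done
  | c :: rest, i, done =>
      if PySem.Int.mod t c = 0 then
        if done + 1 = n then Sum.inl (i + 1)
        else solutionScanB t n rest (i + 1) (done + 1)
      else solutionScanB t n rest (i + 1) done

-- B's 'while True: t += 1; …'; fuel only makes the recursion total (under Pre_ it returns long before)
def solutionLoopB (n : Int) (cores : List Int) : Nat → Int → Int → Int
  | 0, _, _ => 0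
  | fuel + 1, t, done =>
      match solutionScanB (t + 1) n cores 0 done with
      | Sum.inl r => r
      | Sum.inr done' => solutionLoopB n cores fuel (t + 1) done'

def solution_alt (n : Int) (cores : List Int) : Int :=
  if n ≤ (cores.length : Int) then n
  else solutionLoopB n cores 40000 0 (cores.length : Int)

-- ===== PRECONDITION & SPEC =====
-- Pre_ restricts to the task's natural domain (positive core cycle times) and to inputs where A's
-- unbounded 'while 1' actually returns: outside it A raises ZeroDivisionError (a zero core) or
-- diverges (empty cores, or n exceeding the jobs completed by time 39999, A's binary-search cap);
-- non-positive cores, on which A sometimes still returns, are meaningless for the task and excluded.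
def Pre_solution (n : Int) (cores : List Int) : Prop :=
  n ≤ (cores.length : Int) ∨
  (cores ≠ [] ∧ (∀ c ∈ cores, 1 ≤ c) ∧
    n - (cores.length : Int) ≤ ((cores.map (fun c => PySem.Int.floordiv 39999 c)).sum))
instance (n : Int) (cores : List Int) : Decidable (Pre_solution n cores) := by
  unfold Pre_solution; infer_instance

def pvWitness_solution : Int × List Int := (7, [1, 2, 3])

def Spec_solution (n : Int) (cores : List Int) (out : Int) : Prop := out = solution_alt n cores
instance (n : Int) (cores : List Int) (out : Int) : Decidable (Spec_solution n cores out) := by unfold Spec_solution; infer_instance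

-- ===== CLAIM (what is proved, stated in full; the proofs are below) =====
def Claim_equal_solution : Prop := ∀ (n : Int) (cores : List Int), Dom_solution n cores → Pre_solution n cores → Spec_solution n cores (solution n cores)

-- ===== LEMMAS AND PROOFS =====

-- total number of jobs (beyond the initial batch) completed by all cores through time t
def pvCnt (cores : List Int) (t : Int) : Int :=
  ((cores.map (fun c => PySem.Int.floordiv t c)).sum)

-- number of cores finishing a job exactly at time t
def pvHits (cores : List Int) (t : Int) : Int :=
  ((cores.map (fun c => if PySem.Int.mod t c = 0 then (1 : Int) else 0)).sum)

-- the value both programs converge to: A's inner scan evaluated at the minimal crossing time tstar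
def pvFinal (n' : Int) (cores : List Int) (tstar : Int) : Int :=
  match solutionScanA tstar n' cores 0 (pvCnt cores (tstar - 1)) 0 with
  | Sum.inl r => r
  | Sum.inr _ => 0

lemma fd_step (t c : Int) (hc : 1 ≤ c) :
    PySem.Int.floordiv (t - 1) c + (if PySem.Int.mod t c = 0 then (1:Int) else 0) = PySem.Int.floordiv t c := by
  rw [PySem.Int.floordiv_eq_ediv_of_pos (by omega), PySem.Int.floordiv_eq_ediv_of_pos (by omega), PySem.Int.mod_eq_emod_of_pos (by omega)]
  have h0 : t = t / c * c + t % c := by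
    have := Int.mul_ediv_add_emod t c
    linear_combination -this
  have h1 : 0 ≤ t % c := Int.emod_nonneg t (by omega)
  have h2 : t % c < c := Int.emod_lt_of_pos t (by omega)
  by_cases hr : t % c = 0
  · have ht : t - 1 = (c - 1) + (t / c - 1) * c := by
      have : (t / c - 1) * c = t / c * c - c := by ring
      rw [this]; omega
    rw [ht, Int.add_mul_ediv_right _ _ (show c ≠ 0 by omega),
        Int.ediv_eq_zero_of_lt (by omega) (by omega)]
    simp [hr]
  · have ht : t - 1 = (t % c - 1) + (t / c) * c := by
      have : t / c * c = c * (t / c) := by ring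
      omega
    rw [ht, Int.add_mul_ediv_right _ _ (show c ≠ 0 by omega),
        Int.ediv_eq_zero_of_lt (by omega) (by omega)]
    simp [hr]

lemma fd_mono (a b c : Int) (hc : 1 ≤ c) (h : a ≤ b) :
    PySem.Int.floordiv a c ≤ PySem.Int.floordiv b c := by
  rw [PySem.Int.floordiv_eq_ediv_of_pos (by omega), PySem.Int.floordiv_eq_ediv_of_pos (by omega)]
  exact Int.ediv_le_ediv (by omega) h

lemma pvHits_nil (t : Int) : pvHits [] t = 0 := rfl

lemma pvHits_cons (c : Int) (cs : List Int) (t : Int) :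
    pvHits (c :: cs) t = (if PySem.Int.mod t c = 0 then (1:Int) else 0) + pvHits cs t := by
  simp [pvHits]

lemma pvHits_nonneg (cores : List Int) (t : Int) : 0 ≤ pvHits cores t := by
  induction cores with
  | nil => simp [pvHits_nil]
  | cons c rest ih => rw [pvHits_cons]; split_ifs <;> omega

lemma pvCnt_step (cores : List Int) (t : Int) (hpos : ∀ c ∈ cores, 1 ≤ c) :
    pvCnt cores (t - 1) + pvHits cores t = pvCnt cores t := by
  induction cores with
  | nil => simp [pvCnt, pvHits]
  | cons c rest ih =>
      have hc : 1 ≤ c := hpos c (by simp)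
      have hrest := ih (fun x hx => hpos x (by simp [hx]))
      simp only [pvCnt, pvHits, List.map_cons, List.sum_cons] at *
      have := fd_step t c hc
      omega

lemma pvCnt_mono (cores : List Int) (hpos : ∀ c ∈ cores, 1 ≤ c) {t u : Int} (h : t ≤ u) :
    pvCnt cores t ≤ pvCnt cores u := by
  induction cores with
  | nil => simp [pvCnt]
  | cons c rest ih =>
      have hc : 1 ≤ c := hpos c (by simp)
      have hrest := ih (fun x hx => hpos x (by simp [hx]))
      simp only [pvCnt, List.map_cons, List.sum_cons] at *
      have := fd_mono t u c hc h
      omega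

lemma pvCnt_zero (cores : List Int) : pvCnt cores 0 = 0 := by
  induction cores with
  | nil => simp [pvCnt]
  | cons c rest ih =>
      simp only [pvCnt, List.map_cons, List.sum_cons] at *
      simp [PySem.Int.floordiv]

-- A's scan falls through when the completion count stays below the target
lemma scanA_low (mid n : Int) (cs : List Int) (i tmp ct : Int)
    (h : tmp + pvHits cs mid < n) :
    solutionScanA mid n cs i tmp ct = Sum.inr (tmp + pvHits cs mid) := by
  induction cs generalizing i tmp ct with
  | nil => simp [solutionScanA, pvHits_nil]
  | cons c rest ih =>
      have hrest := pvHits_nonneg rest mid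
      rw [pvHits_cons] at h ⊢
      by_cases hm : PySem.Int.mod mid c = 0
      · rw [if_pos hm] at h ⊢
        have h' : tmp + 1 + pvHits rest mid < n := by omega
        have hne : ¬ (tmp + 1 = n ∧ (i + 1 : Int) ≠ 0) := fun ⟨h1, _⟩ => by omega
        simp only [solutionScanA, hm, if_pos]
        rw [if_neg hne, ih _ _ _ h']
        congr 1; omega
      · rw [if_neg hm] at h ⊢
        have h' : tmp + pvHits rest mid < n := by omega
        have hne : ¬ (tmp = n ∧ ct ≠ 0) := fun ⟨h1, _⟩ => by omega
        simp only [solutionScanA, hm, if_neg, not_false_iff]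
        rw [if_neg hne, ih _ _ _ h']
        congr 1; omega

-- A's scan falls through when the count is already at or above the target
lemma scanA_high (mid n : Int) (cs : List Int) (i tmp ct : Int)
    (hge : n ≤ tmp) (hct : tmp = n → ct = 0) :
    solutionScanA mid n cs i tmp ct = Sum.inr (tmp + pvHits cs mid) := by
  induction cs generalizing i tmp ct with
  | nil => simp [solutionScanA, pvHits_nil]
  | cons c rest ih =>
      rw [pvHits_cons]
      by_cases hm : PySem.Int.mod mid c = 0
      · have hne : ¬ (tmp + 1 = n ∧ (i + 1 : Int) ≠ 0) := fun ⟨h1, _⟩ => by omega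
        rw [if_pos hm]
        simp only [solutionScanA, hm, if_pos]
        rw [if_neg hne, ih _ _ _ (by omega) (fun h1 => by omega)]
        congr 1; omega
      · have hne : ¬ (tmp = n ∧ ct ≠ 0) := by
          intro ⟨h1, h2⟩; exact h2 (hct h1)
        rw [if_neg hm]
        simp only [solutionScanA, hm, if_neg, not_false_iff]
        rw [if_neg hne, ih _ _ _ hge hct]
        congr 1; omega

-- A's scan returns when the running count crosses the target from below
lemma scanA_inl (mid n : Int) (cs : List Int) (i tmp ct : Int) (hi : 0 ≤ i)
    (hlt : tmp < n) (hge : n ≤ tmp + pvHits cs mid) :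
    ∃ r, solutionScanA mid n cs i tmp ct = Sum.inl r := by
  induction cs generalizing i tmp ct with
  | nil => rw [pvHits_nil] at hge; omega
  | cons c rest ih =>
      rw [pvHits_cons] at hge
      by_cases hm : PySem.Int.mod mid c = 0
      · rw [if_pos hm] at hge
        by_cases he : tmp + 1 = n
        · refine ⟨i + 1, ?_⟩
          have hp : (tmp + 1 = n ∧ (i + 1 : Int) ≠ 0) := ⟨he, by omega⟩
          simp only [solutionScanA, hm, if_pos]
          rw [if_pos hp]
        · have h' : tmp + 1 < n := by omega
          obtain ⟨r, hr⟩ := ih (i + 1) (tmp + 1) (i + 1) (by omega) h' (by omega)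
          refine ⟨r, ?_⟩
          simp only [solutionScanA, hm, if_pos]
          rw [if_neg (fun ⟨h1, _⟩ => he h1), hr]
      · rw [if_neg hm] at hge
        have hge' : n ≤ tmp + pvHits rest mid := by omega
        obtain ⟨r, hr⟩ := ih (i + 1) tmp ct (by omega) hlt hge'
        refine ⟨r, ?_⟩
        simp only [solutionScanA, hm, if_neg, not_false_iff]
        rw [if_neg (fun ⟨h1, _⟩ => by omega), hr]

-- B's scan is A's scan shifted by δ on the accumulator and the target
lemma scanB_eq_scanA (t n δ : Int) (cs : List Int) (i tmp ct : Int) (hi : 0 ≤ i) (hlt : tmp < n) :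
    solutionScanB t (n + δ) cs i (tmp + δ) =
      Sum.map id (fun d => d + δ) (solutionScanA t n cs i tmp ct) := by
  induction cs generalizing i tmp ct with
  | nil => simp [solutionScanA, solutionScanB]
  | cons c rest ih =>
      by_cases hm : PySem.Int.mod t c = 0
      · by_cases he : tmp + 1 = n
        · have hB : tmp + δ + 1 = n + δ := by omega
          have hp : (tmp + 1 = n ∧ (i + 1 : Int) ≠ 0) := ⟨he, by omega⟩
          simp only [solutionScanA, solutionScanB, hm, if_pos]
          rw [if_pos hB, if_pos hp]
          simp
        · have hB : ¬ (tmp + δ + 1 = n + δ) := by omega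
          simp only [solutionScanA, solutionScanB, hm, if_pos]
          rw [if_neg hB, if_neg (fun ⟨h1, _⟩ => he h1)]
          have : tmp + δ + 1 = (tmp + 1) + δ := by omega
          rw [this, ih _ _ (i+1) (by omega) (by omega)]
      · simp only [solutionScanA, solutionScanB, hm, if_neg, not_false_iff]
        rw [if_neg (fun ⟨h1, _⟩ => by omega), ih _ _ ct (by omega) hlt]

lemma pvMid_bounds (s e : Int) (h : s + 2 ≤ e) :
    s + 1 ≤ PySem.Int.floordiv (s + e) 2 ∧ PySem.Int.floordiv (s + e) 2 ≤ e - 1 := by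
  rw [PySem.Int.floordiv_eq_ediv_of_pos (by norm_num)]
  constructor
  · exact (Int.le_ediv_iff_mul_le (by norm_num)).mpr (by omega)
  · have : (s + e) / 2 < e := (Int.ediv_lt_iff_lt_mul (by norm_num)).mpr (by omega)
    omega

-- A's binary search keeps 'pvCnt start < n ≤ pvCnt stop' and can only exit at the minimal
-- crossing time tstar, returning the scan value there
lemma loopA_eq (n' : Int) (cores : List Int) (hpos : ∀ c ∈ cores, 1 ≤ c)
    (tstar : Int) (ht1 : 1 ≤ tstar) (hQ : n' ≤ pvCnt cores tstar)
    (hmin : ∀ t, 0 ≤ t → t < tstar → pvCnt cores t < n') :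
    ∀ (fuel : Nat) (s e : Int), 0 ≤ s → s < tstar → tstar < e → e - s ≤ (fuel : Int) →
      solutionLoopA n' cores fuel s e = pvFinal n' cores tstar := by
  intro fuel
  induction fuel with
  | zero => intro s e h0 h1 h2 h3; exfalso; push_cast at h3; omega
  | succ f ihf =>
    intro s e h0 h1 h2 h3
    obtain ⟨hm1, hm2⟩ := pvMid_bounds s e (by omega)
    simp only [solutionLoopA]
    rw [PySem.List.foldl_add]
    have htmp : (0:Int) + ((cores.map (fun core => PySem.Int.floordiv (PySem.Int.floordiv (s + e) 2 - 1) core)).sum)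
        = pvCnt cores (PySem.Int.floordiv (s + e) 2 - 1) := by
      simp [pvCnt]
    rw [htmp]
    set mid := PySem.Int.floordiv (s + e) 2 with hmid
    rcases lt_trichotomy mid tstar with hc | hc | hc
    · have hcm : pvCnt cores mid < n' := hmin mid (by omega) hc
      have hlow : pvCnt cores (mid - 1) + pvHits cores mid < n' := by
        rw [pvCnt_step cores mid hpos]; exact hcm
      rw [scanA_low _ _ _ _ _ _ hlow]
      simp only
      rw [if_neg (by omega)]
      exact ihf mid e (by omega) hc h2 (by push_cast at h3 ⊢; omega)
    · subst hc
      have hlt : pvCnt cores (mid - 1) < n' := hmin (mid - 1) (by omega) (by omega)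
      have hge : n' ≤ pvCnt cores (mid - 1) + pvHits cores mid := by
        rw [pvCnt_step cores mid hpos]; exact hQ
      obtain ⟨r, hr⟩ := scanA_inl mid n' cores 0 _ 0 le_rfl hlt hge
      rw [hr]
      simp only [pvFinal]
      rw [hr]
    · have hge1 : n' ≤ pvCnt cores (mid - 1) :=
        le_trans hQ (pvCnt_mono cores hpos (by omega))
      rw [scanA_high _ _ _ _ _ _ hge1 (fun _ => rfl)]
      simp only
      have hnn := pvHits_nonneg cores mid
      rw [if_pos (by omega)]
      exact ihf s mid h0 h1 hc (by push_cast at h3 ⊢; omega)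

-- B's simulation walks forward carrying 'done = len(cores) + pvCnt t' and first returns at tstar
lemma loopB_eq (n' L : Int) (cores : List Int) (hpos : ∀ c ∈ cores, 1 ≤ c)
    (tstar : Int) (hQ : n' ≤ pvCnt cores tstar)
    (hmin : ∀ t, 0 ≤ t → t < tstar → pvCnt cores t < n') :
    ∀ (fuel : Nat) (t : Int), 0 ≤ t → t < tstar → tstar - t ≤ (fuel : Int) →
      solutionLoopB (n' + L) cores fuel t (L + pvCnt cores t) = pvFinal n' cores tstar := by
  intro fuel
  induction fuel with
  | zero => intro t h0 h1 h2; exfalso; push_cast at h2; omega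
  | succ f ihf =>
    intro t h0 h1 h2
    simp only [solutionLoopB]
    rw [Int.add_comm L (pvCnt cores t),
        scanB_eq_scanA (t + 1) n' L cores 0 (pvCnt cores t) 0 le_rfl (hmin t h0 h1)]
    rcases eq_or_lt_of_le (show t + 1 ≤ tstar by omega) with he | hlt2
    · have ht' : t = tstar - 1 := by omega
      subst ht'
      have hstep : tstar - 1 + 1 = tstar := by omega
      rw [hstep]
      have hlt : pvCnt cores (tstar - 1) < n' := hmin (tstar - 1) (by omega) (by omega)
      have hge : n' ≤ pvCnt cores (tstar - 1) + pvHits cores tstar := by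
        rw [pvCnt_step cores tstar hpos]; exact hQ
      obtain ⟨r, hr⟩ := scanA_inl tstar n' cores 0 _ 0 le_rfl hlt hge
      rw [hr]
      simp only [Sum.map, Sum.elim_inl, Function.comp_apply, id_eq, pvFinal]
      rw [hr]
    · have hnext : pvCnt cores (t + 1) < n' := hmin (t + 1) (by omega) hlt2
      have hstep := pvCnt_step cores (t + 1) hpos
      have hts : t + 1 - 1 = t := by omega
      rw [hts] at hstep
      rw [scanA_low (t + 1) n' cores 0 (pvCnt cores t) 0 (by omega)]
      simp only [Sum.map, Sum.elim_inr, Function.comp_apply]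
      have hv : pvCnt cores t + pvHits cores (t + 1) + L = L + pvCnt cores (t + 1) := by omega
      rw [hv]
      exact ihf (t + 1) (by omega) hlt2 (by push_cast at h2 ⊢; omega)

-- ===== VERDICT (by name: the statement is the Claim_ definition above) =====
theorem solution_spec : Claim_equal_solution := by
  intro n cores _dom hpre
  unfold Spec_solution solution solution_alt
  by_cases hn : n ≤ (cores.length : Int)
  · rw [if_neg (by omega), if_pos hn]
  · rw [if_pos (by omega), if_neg hn]
    rcases hpre with h | ⟨_hne, hpos, hcap⟩
    · omega
    have hQ39999 : n - (cores.length : Int) ≤ pvCnt cores 39999 := hcap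
    set L : Int := (cores.length : Int) with hL
    set n' : Int := n - L with hn'
    have hn1 : 1 ≤ n' := by omega
    have hex : ∃ k : ℕ, n' ≤ pvCnt cores (k : Int) :=
      ⟨39999, by exact_mod_cast hQ39999⟩
    have htQ : n' ≤ pvCnt cores ((Nat.find hex : ℕ) : Int) := Nat.find_spec hex
    have htle : Nat.find hex ≤ 39999 := Nat.find_min' hex (by exact_mod_cast hQ39999)
    have hmin : ∀ t : Int, 0 ≤ t → t < ((Nat.find hex : ℕ) : Int) → pvCnt cores t < n' := by
      intro t h0 hlt
      have hk : t = ((t.toNat : ℕ) : Int) := (Int.toNat_of_nonneg h0).symm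
      have hnot : ¬ n' ≤ pvCnt cores ((t.toNat : ℕ) : Int) := Nat.find_min hex (by omega)
      rw [hk]; omega
    have ht1 : 1 ≤ ((Nat.find hex : ℕ) : Int) := by
      rcases Nat.eq_zero_or_pos (Nat.find hex) with h0 | h0
      · rw [h0] at htQ
        rw [show (((0:ℕ)) : Int) = 0 from rfl, pvCnt_zero] at htQ
        omega
      · exact_mod_cast h0
    have hA := loopA_eq n' cores hpos ((Nat.find hex : ℕ) : Int) ht1 htQ hmin
      40000 0 40000 le_rfl (by omega) (by omega) (by norm_num)
    have hB := loopB_eq n' L cores hpos ((Nat.find hex : ℕ) : Int) htQ hmin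
      40000 0 (by norm_num) (by omega) (by push_cast; omega)
    rw [pvCnt_zero, add_zero] at hB
    have hnL : n = n' + L := by omega
    rw [hnL]
    exact hA.trans hB.symm
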